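-- pv_equiv track=rewrite | github.com/fmotamedeiros/lnpg | compiladores/python/2. Linguagem de Expressoes II/parser.py | consumirTokens
-- ===== SOURCE A (Python) =====
-- construcoes = [
--     (['VAR', 'IGUAL', 'VAR', 'SEPARADOR'], 'AtrSimples'),
--     (['VAR', 'IGUAL', 'DIGITO', 'SEPARADOR'], 'AtrSimples'),
--     (['VAR', 'IGUAL', 'VAR', 'OPERADOR', 'VAR', 'SEPARADOR'], 'Atr'),
--     (['VAR', 'IGUAL', 'DIGITO', 'OPERADOR', 'DIGITO', 'SEPARADOR'], 'Atr'),
--     (['VAR', 'IGUAL', 'VAR', 'OPERADOR', 'DIGITO', 'SEPARADOR'], 'Atr'),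
--     (['VAR', 'IGUAL', 'DIGITO', 'OPERADOR', 'VAR', 'SEPARADOR'], 'Atr'),
--     (['IMPRIMIR', 'ABRIR', 'VAR', 'FECHAR', 'SEPARADOR'], 'Imprimir'),
--     (['VAR', 'IGUAL', 'ABRELISTA', 'DIGITO', 'SEPARALISTA', 'DIGITO', 'FECHALISTA', 'SEPARADOR'], 'Lista'),
--     (['TAMANHO', 'ABRIR', 'VAR', 'FECHAR', 'SEPARADOR'], 'Tamanho')
-- ]
--
-- def consumirTokens(tokens, pos):
--     indice = pos
--     for construcao in construcoes:
--         for token in construcao[0]: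
--             if token != tokens[indice][1]:
--                 indice = pos
--                 break
--             else:
--                 indice = indice + 1
--         if indice != pos:
--             return (indice, construcao[1])
--     return (pos, None)
-- ===== SOURCE B (Python) =====
-- def consumirTokens(tokens, pos):
--     # Hand-written recursive-descent style parser branching on the token kinds,
--     # instead of scanning the pattern table; indexes element-by-element so that
--     # out-of-range access raises exactly where the table scan does.
--     def kind(i):
--         return tokens[pos + i][1]
--
--     k0 = kind(0)
--     if k0 in ('IMPRIMIR', 'TAMANHO'):
--         if kind(1) == 'ABRIR' and kind(2) == 'VAR' and kind(3) == 'FECHAR' \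
--                 and kind(4) == 'SEPARADOR':
--             return (pos + 5, 'Imprimir' if k0 == 'IMPRIMIR' else 'Tamanho')
--         return (pos, None)
--     if k0 == 'VAR':
--         if kind(1) != 'IGUAL':
--             return (pos, None)
--         k2 = kind(2)
--         if k2 == 'ABRELISTA':
--             if kind(3) == 'DIGITO' and kind(4) == 'SEPARALISTA' \
--                     and kind(5) == 'DIGITO' and kind(6) == 'FECHALISTA' \
--                     and kind(7) == 'SEPARADOR':
--                 return (pos + 8, 'Lista')
--             return (pos, None)
--         if k2 in ('VAR', 'DIGITO'):
--             k3 = kind(3)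
--             if k3 == 'SEPARADOR':
--                 return (pos + 4, 'AtrSimples')
--             if k3 == 'OPERADOR':
--                 if kind(4) in ('VAR', 'DIGITO') and kind(5) == 'SEPARADOR':
--                     return (pos + 6, 'Atr')
--                 return (pos, None)
--             return (pos, None)
--         return (pos, None)
--     return (pos, None)
-- ===== Notes on version B (the rewrite author's own statement) =====
-- stated objective: alternative
-- what changed: Replaces A's scan over the 9-entry pattern table (retrying the token stream once per pattern) with a hand-written parser that branches once on each token kind, reading every token index at most once.
import Mathlib
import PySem

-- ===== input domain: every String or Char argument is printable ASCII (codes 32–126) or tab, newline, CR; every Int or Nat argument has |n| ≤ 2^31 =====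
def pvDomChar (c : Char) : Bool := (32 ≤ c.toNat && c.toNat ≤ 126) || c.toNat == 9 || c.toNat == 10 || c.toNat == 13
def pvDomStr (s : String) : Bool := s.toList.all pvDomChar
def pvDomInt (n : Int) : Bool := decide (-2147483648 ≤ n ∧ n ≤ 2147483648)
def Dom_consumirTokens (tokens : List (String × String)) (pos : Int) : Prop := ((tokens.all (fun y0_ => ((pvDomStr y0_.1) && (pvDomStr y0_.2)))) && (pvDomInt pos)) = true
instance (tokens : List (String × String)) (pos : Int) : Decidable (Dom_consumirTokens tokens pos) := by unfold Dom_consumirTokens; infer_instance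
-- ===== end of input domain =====

-- B replaces A's pattern-table scan with a hand-written parser that branches on the
-- token kinds (objective: alternative decomposition; same cost). On inputs where the
-- Python A raises IndexError (excluded by Pre_), both ports return (pos, none).

-- ===== PORT A =====
def pvConstrucoes : List (List String × String) :=
  [ (["VAR", "IGUAL", "VAR", "SEPARADOR"], "AtrSimples"),
    (["VAR", "IGUAL", "DIGITO", "SEPARADOR"], "AtrSimples"),
    (["VAR", "IGUAL", "VAR", "OPERADOR", "VAR", "SEPARADOR"], "Atr"),
    (["VAR", "IGUAL", "DIGITO", "OPERADOR", "DIGITO", "SEPARADOR"], "Atr"),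
    (["VAR", "IGUAL", "VAR", "OPERADOR", "DIGITO", "SEPARADOR"], "Atr"),
    (["VAR", "IGUAL", "DIGITO", "OPERADOR", "VAR", "SEPARADOR"], "Atr"),
    (["IMPRIMIR", "ABRIR", "VAR", "FECHAR", "SEPARADOR"], "Imprimir"),
    (["VAR", "IGUAL", "ABRELISTA", "DIGITO", "SEPARALISTA", "DIGITO", "FECHALISTA", "SEPARADOR"], "Lista"),
    (["TAMANHO", "ABRIR", "VAR", "FECHAR", "SEPARADOR"], "Tamanho") ]

-- inner loop of A: walk one pattern; some indice = all matched, none = mismatch (indice reset to pos)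
-- tokens[indice] is PySem.List.pyGet?; none there is Python's IndexError, excluded by Pre_ (treated as mismatch)
def pvScan (tokens : List (String × String)) : List String → Int → Option Int
  | [], indice => some indice
  | t :: rest, indice =>
    match PySem.List.pyGet? tokens indice with
    | none => none
    | some tk => if t ≠ tk.2 then none else pvScan tokens rest (indice + 1)

-- outer loop of A over construcoes
def pvLoop (tokens : List (String × String)) (pos : Int) : List (List String × String) → Int × Option String
  | [] => (pos, none)
  | c :: rest =>
    match pvScan tokens c.1 pos with
    | some indice => if indice ≠ pos then (indice, some c.2) else pvLoop tokens pos rest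
    | none => pvLoop tokens pos rest

def consumirTokens (tokens : List (String × String)) (pos : Int) : Int × Option String :=
  pvLoop tokens pos pvConstrucoes

-- ===== PORT B =====
-- kind(i) = tokens[pos + i][1]; none = Python's IndexError (excluded by Pre_)
def pvKind (tokens : List (String × String)) (pos : Int) (i : Int) : Option String :=
  (PySem.List.pyGet? tokens (pos + i)).map Prod.snd

def consumirTokens_alt (tokens : List (String × String)) (pos : Int) : Int × Option String :=
  if pvKind tokens pos 0 = some "IMPRIMIR" ∨ pvKind tokens pos 0 = some "TAMANHO" then
    if pvKind tokens pos 1 = some "ABRIR" ∧ pvKind tokens pos 2 = some "VAR" ∧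
       pvKind tokens pos 3 = some "FECHAR" ∧ pvKind tokens pos 4 = some "SEPARADOR" then
      (pos + 5, some (if pvKind tokens pos 0 = some "IMPRIMIR" then "Imprimir" else "Tamanho"))
    else (pos, none)
  else if pvKind tokens pos 0 = some "VAR" then
    if pvKind tokens pos 1 ≠ some "IGUAL" then (pos, none)
    else if pvKind tokens pos 2 = some "ABRELISTA" then
      if pvKind tokens pos 3 = some "DIGITO" ∧ pvKind tokens pos 4 = some "SEPARALISTA" ∧
         pvKind tokens pos 5 = some "DIGITO" ∧ pvKind tokens pos 6 = some "FECHALISTA" ∧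
         pvKind tokens pos 7 = some "SEPARADOR" then (pos + 8, some "Lista")
      else (pos, none)
    else if pvKind tokens pos 2 = some "VAR" ∨ pvKind tokens pos 2 = some "DIGITO" then
      if pvKind tokens pos 3 = some "SEPARADOR" then (pos + 4, some "AtrSimples")
      else if pvKind tokens pos 3 = some "OPERADOR" then
        if (pvKind tokens pos 4 = some "VAR" ∨ pvKind tokens pos 4 = some "DIGITO") ∧
           pvKind tokens pos 5 = some "SEPARADOR" then (pos + 6, some "Atr")
        else (pos, none)
      else (pos, none)
    else (pos, none)
  else (pos, none)

-- ===== PRECONDITION & SPEC =====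
-- kind of the token at tokens[pos+i] (for stating Pre_ only)
def pvK (tokens : List (String × String)) (pos : Int) (i : Int) : Option String :=
  (PySem.List.pyGet? tokens (pos + i)).map Prod.snd

-- Pre_ excludes exactly the inputs on which A raises IndexError: the token stream must
-- stay in range for every index A's table scan actually reads (out-of-range start, or a
-- pattern prefix that matches and then runs off the end of the list).
def pvInR (tokens : List (String × String)) (i : Int) : Bool :=
  decide (PySem.Raise.InRange tokens.length i)

-- lookahead needed down the IMPRIMIR/TAMANHO branch
def pvPreCall (tokens : List (String × String)) (pos : Int) : Bool :=
  !(pvK tokens pos 0 == some "IMPRIMIR" || pvK tokens pos 0 == some "TAMANHO") ||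
    (pvInR tokens (pos + 1) &&
     (!(pvK tokens pos 1 == some "ABRIR") ||
      (pvInR tokens (pos + 2) &&
       (!(pvK tokens pos 2 == some "VAR") ||
        (pvInR tokens (pos + 3) &&
         (!(pvK tokens pos 3 == some "FECHAR") || pvInR tokens (pos + 4)))))))

-- lookahead needed down the VAR = ABRELISTA … (list literal) branch
def pvPreLista (tokens : List (String × String)) (pos : Int) : Bool :=
  !(pvK tokens pos 2 == some "ABRELISTA") ||
    (pvInR tokens (pos + 3) &&
     (!(pvK tokens pos 3 == some "DIGITO") ||
      (pvInR tokens (pos + 4) &&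
       (!(pvK tokens pos 4 == some "SEPARALISTA") ||
        (pvInR tokens (pos + 5) &&
         (!(pvK tokens pos 5 == some "DIGITO") ||
          (pvInR tokens (pos + 6) &&
           (!(pvK tokens pos 6 == some "FECHALISTA") || pvInR tokens (pos + 7)))))))))

-- lookahead needed down the VAR = (VAR|DIGITO) [OPERADOR …] branch
def pvPreAtr (tokens : List (String × String)) (pos : Int) : Bool :=
  !(pvK tokens pos 2 == some "VAR" || pvK tokens pos 2 == some "DIGITO") ||
    (pvInR tokens (pos + 3) &&
     (!(pvK tokens pos 3 == some "OPERADOR") ||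
      (pvInR tokens (pos + 4) &&
       (!(pvK tokens pos 4 == some "VAR" || pvK tokens pos 4 == some "DIGITO") ||
        pvInR tokens (pos + 5)))))

-- lookahead needed down the VAR branch
def pvPreVar (tokens : List (String × String)) (pos : Int) : Bool :=
  !(pvK tokens pos 0 == some "VAR") ||
    (pvInR tokens (pos + 1) &&
     (!(pvK tokens pos 1 == some "IGUAL") ||
      (pvInR tokens (pos + 2) && pvPreLista tokens pos && pvPreAtr tokens pos)))

def Pre_consumirTokens (tokens : List (String × String)) (pos : Int) : Prop :=
  (pvInR tokens pos && pvPreCall tokens pos && pvPreVar tokens pos) = true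

instance (tokens : List (String × String)) (pos : Int) : Decidable (Pre_consumirTokens tokens pos) := by
  unfold Pre_consumirTokens; infer_instance

def pvWitness_consumirTokens : (List (String × String)) × Int :=
  ([("imprimir", "IMPRIMIR"), ("(", "ABRIR"), ("x", "VAR"), (")", "FECHAR"), (";", "SEPARADOR")], 0)

def Spec_consumirTokens (tokens : List (String × String)) (pos : Int) (out : Int × Option String) : Prop := out = consumirTokens_alt tokens pos
instance (tokens : List (String × String)) (pos : Int) (out : Int × Option String) : Decidable (Spec_consumirTokens tokens pos out) := by unfold Spec_consumirTokens; infer_instance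

-- ===== CLAIM (what is proved, stated in full; the proofs are below) =====
def Claim_equal_consumirTokens : Prop := ∀ (tokens : List (String × String)) (pos : Int), Dom_consumirTokens tokens pos → Pre_consumirTokens tokens pos → Spec_consumirTokens tokens pos (consumirTokens tokens pos)

-- ===== LEMMAS AND PROOFS =====

-- the two ports agree on EVERY input (both map an out-of-range read to (pos, none))
theorem ports_eq (tokens : List (String × String)) (pos : Int) :
    consumirTokens tokens pos = consumirTokens_alt tokens pos := by
  unfold consumirTokens consumirTokens_alt pvConstrucoes
  cases h0 : PySem.List.pyGet? tokens pos with
  | none => simp [pvLoop, pvScan, pvKind, add_assoc, *]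
  | some tk0 =>
    by_cases e0v : tk0.2 = "VAR"
    · -- VAR
      cases h1 : PySem.List.pyGet? tokens (pos + 1) with
      | none => simp [pvLoop, pvScan, pvKind, add_assoc, *]
      | some tk1 =>
        by_cases e1 : tk1.2 = "IGUAL"
        · -- IGUAL
          cases h2 : PySem.List.pyGet? tokens (pos + 2) with
          | none => simp [pvLoop, pvScan, pvKind, add_assoc, *]
          | some tk2 =>
            by_cases e2l : tk2.2 = "ABRELISTA"
            · -- ABRELISTA
              cases h3 : PySem.List.pyGet? tokens (pos + 3) with
              | none => simp [pvLoop, pvScan, pvKind, add_assoc, *]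
              | some tk3 =>
                by_cases e3 : tk3.2 = "DIGITO"
                · -- DIGITO
                  cases h4 : PySem.List.pyGet? tokens (pos + 4) with
                  | none => simp [pvLoop, pvScan, pvKind, add_assoc, *]
                  | some tk4 =>
                    by_cases e4 : tk4.2 = "SEPARALISTA"
                    · -- SEPARALISTA
                      cases h5 : PySem.List.pyGet? tokens (pos + 5) with
                      | none => simp [pvLoop, pvScan, pvKind, add_assoc, *]
                      | some tk5 =>
                        by_cases e5 : tk5.2 = "DIGITO"
                        · -- DIGITO
                          cases h6 : PySem.List.pyGet? tokens (pos + 6) with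
                          | none => simp [pvLoop, pvScan, pvKind, add_assoc, *]
                          | some tk6 =>
                            by_cases e6 : tk6.2 = "FECHALISTA"
                            · -- FECHALISTA
                              cases h7 : PySem.List.pyGet? tokens (pos + 7) with
                              | none => simp [pvLoop, pvScan, pvKind, add_assoc, *]
                              | some tk7 =>
                                by_cases e7 : tk7.2 = "SEPARADOR"
                                · -- SEPARADOR
                                  simp [pvLoop, pvScan, pvKind, add_assoc, *]
                                · have e7x : ¬("SEPARADOR" = tk7.2) := fun h => e7 h.symm
                                  simp [pvLoop, pvScan, pvKind, add_assoc, *]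
                            · have e6x : ¬("FECHALISTA" = tk6.2) := fun h => e6 h.symm
                              simp [pvLoop, pvScan, pvKind, add_assoc, *]
                        · have e5x : ¬("DIGITO" = tk5.2) := fun h => e5 h.symm
                          simp [pvLoop, pvScan, pvKind, add_assoc, *]
                    · have e4x : ¬("SEPARALISTA" = tk4.2) := fun h => e4 h.symm
                      simp [pvLoop, pvScan, pvKind, add_assoc, *]
                · have e3x : ¬("DIGITO" = tk3.2) := fun h => e3 h.symm
                  simp [pvLoop, pvScan, pvKind, add_assoc, *]
            · have e2lx : ¬("ABRELISTA" = tk2.2) := fun h => e2l h.symm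
              by_cases e2v : tk2.2 = "VAR"
              · -- VAR
                cases h3 : PySem.List.pyGet? tokens (pos + 3) with
                | none => simp [pvLoop, pvScan, pvKind, add_assoc, *]
                | some tk3 =>
                  by_cases e3s : tk3.2 = "SEPARADOR"
                  · -- SEPARADOR
                    simp [pvLoop, pvScan, pvKind, add_assoc, *]
                  · have e3sx : ¬("SEPARADOR" = tk3.2) := fun h => e3s h.symm
                    by_cases e3o : tk3.2 = "OPERADOR"
                    · -- OPERADOR
                      cases h4 : PySem.List.pyGet? tokens (pos + 4) with
                      | none => simp [pvLoop, pvScan, pvKind, add_assoc, *]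
                      | some tk4 =>
                        by_cases e4v : tk4.2 = "VAR"
                        · -- VAR
                          cases h5 : PySem.List.pyGet? tokens (pos + 5) with
                          | none => simp [pvLoop, pvScan, pvKind, add_assoc, *]
                          | some tk5 =>
                            by_cases e5 : tk5.2 = "SEPARADOR"
                            · -- SEPARADOR
                              simp [pvLoop, pvScan, pvKind, add_assoc, *]
                            · have e5x : ¬("SEPARADOR" = tk5.2) := fun h => e5 h.symm
                              simp [pvLoop, pvScan, pvKind, add_assoc, *]
                        · have e4vx : ¬("VAR" = tk4.2) := fun h => e4v h.symm
                          by_cases e4d : tk4.2 = "DIGITO"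
                          · -- DIGITO
                            cases h5 : PySem.List.pyGet? tokens (pos + 5) with
                            | none => simp [pvLoop, pvScan, pvKind, add_assoc, *]
                            | some tk5 =>
                              by_cases e5 : tk5.2 = "SEPARADOR"
                              · -- SEPARADOR
                                simp [pvLoop, pvScan, pvKind, add_assoc, *]
                              · have e5x : ¬("SEPARADOR" = tk5.2) := fun h => e5 h.symm
                                simp [pvLoop, pvScan, pvKind, add_assoc, *]
                          · have e4dx : ¬("DIGITO" = tk4.2) := fun h => e4d h.symm
                            simp [pvLoop, pvScan, pvKind, add_assoc, *]
                    · have e3ox : ¬("OPERADOR" = tk3.2) := fun h => e3o h.symm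
                      simp [pvLoop, pvScan, pvKind, add_assoc, *]
              · have e2vx : ¬("VAR" = tk2.2) := fun h => e2v h.symm
                by_cases e2d : tk2.2 = "DIGITO"
                · -- DIGITO
                  cases h3 : PySem.List.pyGet? tokens (pos + 3) with
                  | none => simp [pvLoop, pvScan, pvKind, add_assoc, *]
                  | some tk3 =>
                    by_cases e3s : tk3.2 = "SEPARADOR"
                    · -- SEPARADOR
                      simp [pvLoop, pvScan, pvKind, add_assoc, *]
                    · have e3sx : ¬("SEPARADOR" = tk3.2) := fun h => e3s h.symm
                      by_cases e3o : tk3.2 = "OPERADOR"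
                      · -- OPERADOR
                        cases h4 : PySem.List.pyGet? tokens (pos + 4) with
                        | none => simp [pvLoop, pvScan, pvKind, add_assoc, *]
                        | some tk4 =>
                          by_cases e4v : tk4.2 = "VAR"
                          · -- VAR
                            cases h5 : PySem.List.pyGet? tokens (pos + 5) with
                            | none => simp [pvLoop, pvScan, pvKind, add_assoc, *]
                            | some tk5 =>
                              by_cases e5 : tk5.2 = "SEPARADOR"
                              · -- SEPARADOR
                                simp [pvLoop, pvScan, pvKind, add_assoc, *]
                              · have e5x : ¬("SEPARADOR" = tk5.2) := fun h => e5 h.symm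
                                simp [pvLoop, pvScan, pvKind, add_assoc, *]
                          · have e4vx : ¬("VAR" = tk4.2) := fun h => e4v h.symm
                            by_cases e4d : tk4.2 = "DIGITO"
                            · -- DIGITO
                              cases h5 : PySem.List.pyGet? tokens (pos + 5) with
                              | none => simp [pvLoop, pvScan, pvKind, add_assoc, *]
                              | some tk5 =>
                                by_cases e5 : tk5.2 = "SEPARADOR"
                                · -- SEPARADOR
                                  simp [pvLoop, pvScan, pvKind, add_assoc, *]
                                · have e5x : ¬("SEPARADOR" = tk5.2) := fun h => e5 h.symm
                                  simp [pvLoop, pvScan, pvKind, add_assoc, *]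
                            · have e4dx : ¬("DIGITO" = tk4.2) := fun h => e4d h.symm
                              simp [pvLoop, pvScan, pvKind, add_assoc, *]
                      · have e3ox : ¬("OPERADOR" = tk3.2) := fun h => e3o h.symm
                        simp [pvLoop, pvScan, pvKind, add_assoc, *]
                · have e2dx : ¬("DIGITO" = tk2.2) := fun h => e2d h.symm
                  simp [pvLoop, pvScan, pvKind, add_assoc, *]
        · have e1x : ¬("IGUAL" = tk1.2) := fun h => e1 h.symm
          simp [pvLoop, pvScan, pvKind, add_assoc, *]
    · have e0vx : ¬("VAR" = tk0.2) := fun h => e0v h.symm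
      by_cases e0i : tk0.2 = "IMPRIMIR"
      · -- IMPRIMIR
        cases h1 : PySem.List.pyGet? tokens (pos + 1) with
        | none => simp [pvLoop, pvScan, pvKind, add_assoc, *]
        | some tk1 =>
          by_cases e1 : tk1.2 = "ABRIR"
          · -- ABRIR
            cases h2 : PySem.List.pyGet? tokens (pos + 2) with
            | none => simp [pvLoop, pvScan, pvKind, add_assoc, *]
            | some tk2 =>
              by_cases e2 : tk2.2 = "VAR"
              · -- VAR
                cases h3 : PySem.List.pyGet? tokens (pos + 3) with
                | none => simp [pvLoop, pvScan, pvKind, add_assoc, *]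
                | some tk3 =>
                  by_cases e3 : tk3.2 = "FECHAR"
                  · -- FECHAR
                    cases h4 : PySem.List.pyGet? tokens (pos + 4) with
                    | none => simp [pvLoop, pvScan, pvKind, add_assoc, *]
                    | some tk4 =>
                      by_cases e4 : tk4.2 = "SEPARADOR"
                      · -- SEPARADOR
                        simp [pvLoop, pvScan, pvKind, add_assoc, *]
                      · have e4x : ¬("SEPARADOR" = tk4.2) := fun h => e4 h.symm
                        simp [pvLoop, pvScan, pvKind, add_assoc, *]
                  · have e3x : ¬("FECHAR" = tk3.2) := fun h => e3 h.symm
                    simp [pvLoop, pvScan, pvKind, add_assoc, *]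
              · have e2x : ¬("VAR" = tk2.2) := fun h => e2 h.symm
                simp [pvLoop, pvScan, pvKind, add_assoc, *]
          · have e1x : ¬("ABRIR" = tk1.2) := fun h => e1 h.symm
            simp [pvLoop, pvScan, pvKind, add_assoc, *]
      · have e0ix : ¬("IMPRIMIR" = tk0.2) := fun h => e0i h.symm
        by_cases e0t : tk0.2 = "TAMANHO"
        · -- TAMANHO
          cases h1 : PySem.List.pyGet? tokens (pos + 1) with
          | none => simp [pvLoop, pvScan, pvKind, add_assoc, *]
          | some tk1 =>
            by_cases e1 : tk1.2 = "ABRIR"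
            · -- ABRIR
              cases h2 : PySem.List.pyGet? tokens (pos + 2) with
              | none => simp [pvLoop, pvScan, pvKind, add_assoc, *]
              | some tk2 =>
                by_cases e2 : tk2.2 = "VAR"
                · -- VAR
                  cases h3 : PySem.List.pyGet? tokens (pos + 3) with
                  | none => simp [pvLoop, pvScan, pvKind, add_assoc, *]
                  | some tk3 =>
                    by_cases e3 : tk3.2 = "FECHAR"
                    · -- FECHAR
                      cases h4 : PySem.List.pyGet? tokens (pos + 4) with
                      | none => simp [pvLoop, pvScan, pvKind, add_assoc, *]
                      | some tk4 =>
                        by_cases e4 : tk4.2 = "SEPARADOR"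
                        · -- SEPARADOR
                          simp [pvLoop, pvScan, pvKind, add_assoc, *]
                        · have e4x : ¬("SEPARADOR" = tk4.2) := fun h => e4 h.symm
                          simp [pvLoop, pvScan, pvKind, add_assoc, *]
                    · have e3x : ¬("FECHAR" = tk3.2) := fun h => e3 h.symm
                      simp [pvLoop, pvScan, pvKind, add_assoc, *]
                · have e2x : ¬("VAR" = tk2.2) := fun h => e2 h.symm
                  simp [pvLoop, pvScan, pvKind, add_assoc, *]
            · have e1x : ¬("ABRIR" = tk1.2) := fun h => e1 h.symm
              simp [pvLoop, pvScan, pvKind, add_assoc, *]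
        · have e0tx : ¬("TAMANHO" = tk0.2) := fun h => e0t h.symm
          simp [pvLoop, pvScan, pvKind, add_assoc, *]

-- ===== VERDICT (by name: the statement is the Claim_ definition above) =====
theorem consumirTokens_spec : Claim_equal_consumirTokens := by
  intro tokens pos _ _
  exact (ports_eq tokens pos).symm ▸ rfl
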